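-- pv_equiv track=rewrite | github.com/ThatAquarel/scintillating_chamber | display/display_2/Visualizer/data_manager.py | interpret_raw_data
-- ===== SOURCE A (Python) =====
-- def interpret_raw_data(bin):
--     x = bin & 3355443   #& operator on 0b001100110011001100110011
--     y = bin & 13421772  #& operator on 0b110011001100110011001100
--
--     bit = 12
--     list_x = []
--     list_y = []
--     for i in range(0, bit, 2):
--         last_two_x = (x >> (i * 2))
--         list_x.append(((last_two_x & 2) >> 1, last_two_x & 1))
--
--         last_two_x = (y >> (i * 2 + 2))
--         list_y.append(((last_two_x & 2) >> 1, last_two_x & 1))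
--
--     return [list_x,list_y]
-- ===== SOURCE B (Python) =====
-- def interpret_raw_data(bin):
--     # Fixed-width binary string of the masked value; walk it in four-char nibbles
--     # from the least-significant nibble upward instead of arithmetic shifts.
--     s = format(bin & 0xFFFFFF, "024b")
--     list_x = []
--     list_y = []
--     for k in range(5, -1, -1):
--         nib = s[4 * k : 4 * k + 4]
--         list_y.append((int(nib[0]), int(nib[1])))
--         list_x.append((int(nib[2]), int(nib[3])))
--     return [list_x, list_y]
-- ===== Notes on version B (the rewrite author's own statement) =====
-- stated objective: alternative
-- what changed: B formats the masked value as a fixed-width binary string and slices it into four-character nibbles (two high chars give the y pair, two low chars the x pair), instead of A's per-group arithmetic shifts and bit masks.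
import Mathlib
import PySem

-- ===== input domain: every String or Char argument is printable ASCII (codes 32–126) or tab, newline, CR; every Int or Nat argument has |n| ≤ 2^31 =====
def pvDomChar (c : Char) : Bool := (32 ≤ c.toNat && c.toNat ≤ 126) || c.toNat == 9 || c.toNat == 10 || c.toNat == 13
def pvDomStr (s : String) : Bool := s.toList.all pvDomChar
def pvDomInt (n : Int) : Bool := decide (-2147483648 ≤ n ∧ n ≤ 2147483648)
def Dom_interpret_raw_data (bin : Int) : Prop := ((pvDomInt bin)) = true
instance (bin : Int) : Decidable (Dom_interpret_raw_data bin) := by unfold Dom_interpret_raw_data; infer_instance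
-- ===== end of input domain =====

-- B decodes the same bit pairs by formatting the masked value as a fixed-width binary
-- string and slicing it into four-character nibbles, instead of A's arithmetic
-- shift-and-mask loop (objective: alternative decomposition, same cost).


-- ===== PORT A =====
def interpret_raw_data (bin : Int) : List (List (Int × Int)) :=
  let x := PySem.Int.band bin 3355443
  let y := PySem.Int.band bin 13421772
  let bit : Int := 12
  -- for i in range(0, bit, 2): append to list_x and list_y
  let st := (PySem.List.pyRange 0 bit 2).foldl
    (fun (st : List (Int × Int) × List (Int × Int)) i =>
      -- i ≥ 0 here, so (i * 2).toNat is Python's nonnegative shift amount, exact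
      let ltx := x >>> (i * 2).toNat
      let lx := st.1 ++ [((PySem.Int.band ltx 2) >>> 1, PySem.Int.band ltx 1)]
      let lty := y >>> (i * 2 + 2).toNat
      let ly := st.2 ++ [((PySem.Int.band lty 2) >>> 1, PySem.Int.band lty 1)]
      (lx, ly))
    ([], [])
  [st.1, st.2]

-- ===== PORT B =====
-- exact port of format(m, "024b") for 0 ≤ m < 2^24: the 24-character binary string
def pvBin24 (m : Nat) : List Char :=
  (List.range 24).map (fun j => if m.testBit (23 - j) then '1' else '0')

-- int(ch) for a character of pvBin24 (always '0' or '1'), exact there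
def pvBitChar (c : Char) : Int := if c = '1' then 1 else 0

def interpret_raw_data_alt (bin : Int) : List (List (Int × Int)) :=
  let s := pvBin24 (PySem.Int.band bin 16777215).toNat
  -- for k in range(5, -1, -1): slice off one 4-char nibble per step
  let st := (PySem.List.pyRange 5 (-1) (-1)).foldl
    (fun (st : List (Int × Int) × List (Int × Int)) k =>
      let nib := PySem.List.slice s (some (4 * k)) (some (4 * k + 4))
      -- nib always has 4 characters, so Python's nib[0‥3] never raises; default is dead
      let ly := st.2 ++ [(pvBitChar (PySem.List.pyGetD nib 0 '0'), pvBitChar (PySem.List.pyGetD nib 1 '0'))]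
      let lx := st.1 ++ [(pvBitChar (PySem.List.pyGetD nib 2 '0'), pvBitChar (PySem.List.pyGetD nib 3 '0'))]
      (lx, ly))
    ([], [])
  [st.1, st.2]

-- ===== PRECONDITION & SPEC =====
def Spec_interpret_raw_data (bin : Int) (out : List (List (Int × Int))) : Prop := out = interpret_raw_data_alt bin
instance (bin : Int) (out : List (List (Int × Int))) : Decidable (Spec_interpret_raw_data bin out) := by unfold Spec_interpret_raw_data; infer_instance

-- ===== CLAIM (what is proved, stated in full; the proofs are below) =====
def Claim_equal_interpret_raw_data : Prop := ∀ (bin : Int), Dom_interpret_raw_data bin → Spec_interpret_raw_data bin (interpret_raw_data bin)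

-- ===== LEMMAS AND PROOFS =====

-- /2 distributes over &&&
lemma pv_and_div (m k : Nat) : (m &&& k) / 2 = (m / 2) &&& (k / 2) := by
  have := @Nat.shiftRight_and_distrib 1 m k
  simpa [Nat.shiftRight_one] using this

lemma pv_ldiff_div (m k : Nat) : (Nat.ldiff m k) / 2 = Nat.ldiff (m / 2) (k / 2) := by
  apply Nat.eq_of_testBit_eq; intro i
  simp [Nat.testBit_div_two, Nat.testBit_ldiff]

lemma pv_mod_two_testBit (x : Nat) : x % 2 = if x.testBit 0 then 1 else 0 := by
  rw [Nat.testBit_zero]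
  rcases Nat.mod_two_eq_zero_or_one x with h | h <;> simp [h]

-- subtracting the sub-mask m &&& k from m clears exactly k's bits
lemma pv_sub_and (m : Nat) : ∀ k, m - (m &&& k) = Nat.ldiff m k := by
  induction m using Nat.strong_induction_on with
  | _ m ih =>
    intro k
    rcases Nat.eq_zero_or_pos m with rfl | hm
    · apply Nat.eq_of_testBit_eq; intro i
      simp [Nat.testBit_ldiff]
    · have ih2 := ih (m / 2) (by omega) (k / 2)
      have h1 := pv_and_div m k
      have h2 := pv_ldiff_div m k
      have hle : (m / 2) &&& (k / 2) ≤ m / 2 := Nat.and_le_left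
      have p1 : (m &&& k) % 2 = if (m.testBit 0 && k.testBit 0) then 1 else 0 := by
        rw [pv_mod_two_testBit, Nat.testBit_and]
      have p2 : (Nat.ldiff m k) % 2 = if (m.testBit 0 && !k.testBit 0) then 1 else 0 := by
        rw [pv_mod_two_testBit, Nat.testBit_ldiff]
      have p3 := pv_mod_two_testBit m
      cases hb : m.testBit 0 <;> cases hc : k.testBit 0 <;>
        simp only [hb, hc, Bool.and_self, Bool.and_true, Bool.and_false, Bool.not_true,
          Bool.not_false, if_true, if_false, Bool.false_eq_true, ite_true, ite_false] at p1 p2 p3 <;>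
        omega

-- masking with a sub-mask M of the low-24-bit mask factors through the low 24 bits,
-- on negative inputs as well (Python's infinite two's complement)
lemma pv_band_low (a : Int) (M : Nat)
    (hM : ∀ i, M.testBit i = true → (16777215 : Nat).testBit i = true) :
    PySem.Int.band a (M : Int) = (((PySem.Int.band a 16777215).toNat &&& M : Nat) : Int) := by
  cases a with
  | ofNat m =>
    rw [show ((Int.ofNat m) = ((m:Nat):Int)) from rfl]
    rw [PySem.Int.band_of_nonneg (by positivity) (by positivity),
        PySem.Int.band_of_nonneg (by positivity) (by positivity)]
    simp only [Int.toNat_natCast]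
    norm_num
    apply Nat.eq_of_testBit_eq; intro i
    simp only [Nat.testBit_and]
    cases hMi : M.testBit i
    · simp
    · simp [hM i hMi]
  | negSucc k =>
    unfold PySem.Int.band
    norm_num
    rw [show ((Int.toNat 16777215 : Nat) = 16777215) from rfl]
    rw [pv_sub_and, pv_sub_and]
    apply Nat.eq_of_testBit_eq; intro i
    simp only [Nat.testBit_and, Nat.testBit_ldiff]
    cases hMi : M.testBit i
    · simp
    · simp [hM i hMi]

lemma pv_imp_of_and (M W : Nat) (h : M &&& W = M) :
    ∀ i, M.testBit i = true → W.testBit i = true := by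
  intro i hi
  have hand := Nat.testBit_and M W i
  rw [h, hi] at hand
  cases hW : W.testBit i
  · rw [hW] at hand; simp at hand
  · rfl

lemma pv_bitChar_if (p : Prop) [Decidable p] :
    pvBitChar (if p then '1' else '0') = if p then 1 else 0 := by
  by_cases h : p <;> simp [h, pvBitChar]

lemma pv_nat_and_one (x : Nat) : x &&& 1 = if x.testBit 0 then 1 else 0 := by
  rw [Nat.and_one_is_mod, Nat.testBit_zero]
  rcases Nat.mod_two_eq_zero_or_one x with h | h <;> simp [h]

-- (a >> k) & 1 extracts bit k
lemma pv_compA1 (a k : Nat) :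
    PySem.Int.band ((a:Int) >>> ((k:Nat):Int)) 1 = if a.testBit k then 1 else 0 := by
  rw [Int.shiftRight_natCast,
      show (1:Int) = ((1:Nat):Int) from rfl, PySem.Int.band_natCast,
      pv_nat_and_one, Nat.testBit_shiftRight]
  norm_num

-- ((a >> k) & 2) >> 1 extracts bit k+1
lemma pv_compA2 (a k : Nat) :
    (PySem.Int.band ((a:Int) >>> ((k:Nat):Int)) 2) >>> (1:Int) = if a.testBit (k+1) then 1 else 0 := by
  rw [Int.shiftRight_natCast,
      show (2:Int) = ((2:Nat):Int) from rfl, PySem.Int.band_natCast,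
      show (1:Int) = ((1:Nat):Int) from rfl, Int.shiftRight_natCast,
      Nat.shiftRight_and_distrib, show ((2:Nat) >>> 1) = 1 from rfl,
      pv_nat_and_one, ← Nat.shiftRight_add, Nat.testBit_shiftRight]
  norm_num

-- both ports agree once both masks are expressed through the low 24 bits N
lemma pv_main_of_masks (bin : Int) (N : Nat)
    (hx : PySem.Int.band bin 3355443 = ((N &&& 3355443 : Nat) : Int))
    (hy : PySem.Int.band bin 13421772 = ((N &&& 13421772 : Nat) : Int))
    (hm : PySem.Int.band bin 16777215 = (N : Int)) :
    interpret_raw_data bin = interpret_raw_data_alt bin := by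
  have hr1 : PySem.List.pyRange 0 12 2 = [0,2,4,6,8,10] := by decide
  have hr2 : PySem.List.pyRange 5 (-1) (-1) = [5,4,3,2,1,0] := by decide
  simp only [interpret_raw_data, interpret_raw_data_alt, hx, hy, hm, hr1, hr2, List.foldl,
    pvBin24, List.range_succ, List.range_zero]
  simp only [pv_compA1, pv_compA2]
  norm_num [PySem.List.slice, PySem.List.pyGetD, PySem.List.pyIdx?, pv_bitChar_if,
    Nat.testBit_and, (by decide : Int.toNat 0 = 0), (by decide : Int.toNat 1 = 1), (by decide : Int.toNat 2 = 2), (by decide : Int.toNat 3 = 3), (by decide : Int.toNat 4 = 4), (by decide : Int.toNat 5 = 5), (by decide : Int.toNat 6 = 6), (by decide : Int.toNat 7 = 7), (by decide : Int.toNat 8 = 8), (by decide : Int.toNat 9 = 9), (by decide : Int.toNat 10 = 10), (by decide : Int.toNat 11 = 11), (by decide : Int.toNat 12 = 12), (by decide : Int.toNat 13 = 13), (by decide : Int.toNat 14 = 14), (by decide : Int.toNat 15 = 15), (by decide : Int.toNat 16 = 16), (by decide : Int.toNat 17 = 17), (by decide : Int.toNat 18 = 18), (by decide : Int.toNat 19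 = 19), (by decide : Int.toNat 20 = 20), (by decide : Int.toNat 21 = 21), (by decide : Int.toNat 22 = 22), (by decide : Int.toNat 23 = 23), (by decide : Int.toNat 24 = 24),
    (by decide : Nat.testBit 3355443 0 = true),
    (by decide : Nat.testBit 3355443 1 = true),
    (by decide : Nat.testBit 3355443 4 = true),
    (by decide : Nat.testBit 3355443 5 = true),
    (by decide : Nat.testBit 3355443 8 = true),
    (by decide : Nat.testBit 3355443 9 = true),
    (by decide : Nat.testBit 3355443 12 = true),
    (by decide : Nat.testBit 3355443 13 = true),
    (by decide : Nat.testBit 3355443 16 = true),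
    (by decide : Nat.testBit 3355443 17 = true),
    (by decide : Nat.testBit 3355443 20 = true),
    (by decide : Nat.testBit 3355443 21 = true),
    (by decide : Nat.testBit 13421772 2 = true),
    (by decide : Nat.testBit 13421772 3 = true),
    (by decide : Nat.testBit 13421772 6 = true),
    (by decide : Nat.testBit 13421772 7 = true),
    (by decide : Nat.testBit 13421772 10 = true),
    (by decide : Nat.testBit 13421772 11 = true),
    (by decide : Nat.testBit 13421772 14 = true),
    (by decide : Nat.testBit 13421772 15 = true),
    (by decide : Nat.testBit 13421772 18 = true),
    (by decide : Nat.testBit 13421772 19 = true),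
    (by decide : Nat.testBit 13421772 22 = true),
    (by decide : Nat.testBit 13421772 23 = true)]

-- ===== VERDICT (by name: the statement is the Claim_ definition above) =====
set_option maxHeartbeats 1000000 in
theorem interpret_raw_data_spec : Claim_equal_interpret_raw_data := by
  intro bin _
  unfold Spec_interpret_raw_data
  have hmm := pv_band_low bin 16777215 (fun _ h => h)
  simp only [Nat.cast_ofNat] at hmm
  have hNself : (PySem.Int.band bin 16777215).toNat
      = (PySem.Int.band bin 16777215).toNat &&& 16777215 := by
    conv_lhs => rw [hmm]
    simp
  have hm : PySem.Int.band bin 16777215 = (((PySem.Int.band bin 16777215).toNat : Nat) : Int) := by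
    conv_lhs => rw [hmm]
    rw [← hNself]
  have hx := pv_band_low bin 3355443 (pv_imp_of_and _ _ (by decide))
  simp only [Nat.cast_ofNat] at hx
  have hy := pv_band_low bin 13421772 (pv_imp_of_and _ _ (by decide))
  simp only [Nat.cast_ofNat] at hy
  exact pv_main_of_masks bin (PySem.Int.band bin 16777215).toNat hx hy hm
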